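-- pv_equiv track=rewrite | github.com/kartol/adventofcode | 2024/22/main2.py | solve_number
-- ===== SOURCE A (Python) =====
-- from collections import defaultdict, deque
--
-- def mix(secret_number, to_mix):
--     return secret_number ^ to_mix
--
-- def prune(secret_number):
--     return secret_number % 16777216
--
-- def next_number(secret_number):
--     secret_number = prune(mix(secret_number, secret_number << 6))
--     secret_number = prune(mix(secret_number, secret_number >> 5))
--     secret_number = prune(mix(secret_number, secret_number << 11))
--     return secret_number
--
-- def solve_number(number, n_iters):
--     seq_price = {}
--     d = deque(maxlen=4)
--
--     price_number = number % 10
--     previous_price_number = price_number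
--     for _ in range(n_iters):
--         number = next_number(number)
--         price_number = number % 10
--         diff = price_number - previous_price_number
--         d.append(diff)
--         if len(d) == 4:
--             seq = tuple(d)
--             if seq not in seq_price:
--                 seq_price[tuple(d)] = price_number
--         previous_price_number = price_number
--     return seq_price
-- ===== SOURCE B (Python) =====
-- def mix(secret_number, to_mix):
--     return secret_number ^ to_mix
--
-- def prune(secret_number):
--     return secret_number % 16777216
--
-- def next_number(secret_number):
--     secret_number = prune(mix(secret_number, secret_number << 6))
--     secret_number = prune(mix(secret_number, secret_number >> 5))
--     secret_number = prune(mix(secret_number, secret_number << 11))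
--     return secret_number
--
-- def solve_number(number, n_iters):
--     # Phase 1: precompute the full price sequence.
--     prices = [number % 10]
--     n = number
--     for _ in range(n_iters):
--         n = next_number(n)
--         prices.append(n % 10)
--     # Phase 2: scan every 5-price window by index.
--     seq_price = {}
--     for i in range(len(prices) - 4):
--         seq = (prices[i + 1] - prices[i],
--                prices[i + 2] - prices[i + 1],
--                prices[i + 3] - prices[i + 2],
--                prices[i + 4] - prices[i + 3])
--         if seq not in seq_price:
--             seq_price[seq] = prices[i + 4]
--     return seq_price
-- ===== Notes on version B (the rewrite author's own statement) =====
-- stated objective: alternative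
-- what changed: B replaces A's single streaming loop with its deque and per-step len==4 guard by two phases: first precompute the full price list, then scan 5-price windows by index to build the first-seen map.
import Mathlib
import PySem

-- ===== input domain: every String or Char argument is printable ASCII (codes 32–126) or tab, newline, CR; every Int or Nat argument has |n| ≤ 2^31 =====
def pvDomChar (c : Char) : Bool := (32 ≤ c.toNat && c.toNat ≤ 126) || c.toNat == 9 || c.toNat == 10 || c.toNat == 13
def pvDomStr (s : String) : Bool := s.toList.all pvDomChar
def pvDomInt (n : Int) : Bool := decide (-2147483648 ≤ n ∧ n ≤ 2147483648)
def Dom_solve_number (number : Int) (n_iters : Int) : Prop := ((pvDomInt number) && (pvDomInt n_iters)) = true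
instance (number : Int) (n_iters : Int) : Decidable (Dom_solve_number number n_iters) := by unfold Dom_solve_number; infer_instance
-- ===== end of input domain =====

-- B re-decomposes A's streaming deque loop into two phases (a precomputed price list, then an
-- indexed 5-price-window scan); equivalence of the returned association list is proved (alternative, same cost).

-- ===== PORT A =====
def nextNumber (s : Int) : Int :=
  let s1 := PySem.Int.mod (PySem.Int.bxor s (s <<< 6)) 16777216
  let s2 := PySem.Int.mod (PySem.Int.bxor s1 (s1 >>> 5)) 16777216
  PySem.Int.mod (PySem.Int.bxor s2 (s2 <<< 11)) 16777216

-- 'seq not in seq_price' on the dict-as-association-list (keys are the first four components)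
def hasKeyA (sp : List (Int × Int × Int × Int × Int)) (s : Int × Int × Int × Int) : Bool :=
  sp.any (fun e => decide ((e.1, e.2.1, e.2.2.1, e.2.2.2.1) = s))

-- one iteration of A's loop: state (number, previous_price_number, deque d, seq_price)
def stepA (st : Int × Int × List Int × List (Int × Int × Int × Int × Int)) :
    Int × Int × List Int × List (Int × Int × Int × Int × Int) :=
  let (num, prev, d, sp) := st
  let num' := nextNumber num
  let price := PySem.Int.mod num' 10
  let diff := price - prev
  let d1 := d ++ [diff]                                    -- deque append …
  let d2 := if 4 < d1.length then d1.tail else d1          -- … with maxlen=4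
  let sp' := if d2.length == 4 then
      match d2 with
      | [a, b, c, e] => if hasKeyA sp (a, b, c, e) then sp else sp ++ [(a, b, c, e, price)]
      | _ => sp
    else sp
  (num', price, d2, sp')

def solve_number (number : Int) (n_iters : Int) : List (Int × Int × Int × Int × Int) :=
  ((PySem.List.pyRange 0 n_iters 1).foldl (fun st _ => stepA st)
    (number, PySem.Int.mod number 10, ([] : List Int),
      ([] : List (Int × Int × Int × Int × Int)))).2.2.2

-- ===== PORT B =====
def hasKeyB (sp : List (Int × Int × Int × Int × Int)) (s : Int × Int × Int × Int) : Bool :=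
  sp.any (fun e => decide ((e.1, e.2.1, e.2.2.1, e.2.2.2.1) = s))

-- one iteration of B's phase-1 loop: state (n, prices)
def stepB1 (st : Int × List Int) : Int × List Int :=
  let n' := nextNumber st.1
  (n', st.2 ++ [PySem.Int.mod n' 10])

-- one iteration of B's phase-2 window scan at window start i
def stepB2 (prices : List (Int)) (sp : List (Int × Int × Int × Int × Int)) (i : Int) :
    List (Int × Int × Int × Int × Int) :=
  let s := (PySem.List.pyGetD prices (i + 1) 0 - PySem.List.pyGetD prices i 0,
            PySem.List.pyGetD prices (i + 2) 0 - PySem.List.pyGetD prices (i + 1) 0,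
            PySem.List.pyGetD prices (i + 3) 0 - PySem.List.pyGetD prices (i + 2) 0,
            PySem.List.pyGetD prices (i + 4) 0 - PySem.List.pyGetD prices (i + 3) 0)
  if hasKeyB sp s then sp
  else sp ++ [(s.1, s.2.1, s.2.2.1, s.2.2.2, PySem.List.pyGetD prices (i + 4) 0)]

def solve_number_alt (number : Int) (n_iters : Int) : List (Int × Int × Int × Int × Int) :=
  -- Phase 1: full price list
  let pr := (PySem.List.pyRange 0 n_iters 1).foldl (fun st _ => stepB1 st)
    (number, [PySem.Int.mod number 10])
  let prices := pr.2
  -- Phase 2: indexed scan of 5-price windows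
  (PySem.List.pyRange 0 ((prices.length : Int) - 4) 1).foldl (stepB2 prices) []

-- ===== PRECONDITION & SPEC =====
def Spec_solve_number (number : Int) (n_iters : Int) (out : List (Int × Int × Int × Int × Int)) : Prop := out = solve_number_alt number n_iters
instance (number : Int) (n_iters : Int) (out : List (Int × Int × Int × Int × Int)) : Decidable (Spec_solve_number number n_iters out) := by unfold Spec_solve_number; infer_instance

-- ===== CLAIM (what is proved, stated in full; the proofs are below) =====
def Claim_equal_solve_number : Prop := ∀ (number : Int) (n_iters : Int), Dom_solve_number number n_iters → Spec_solve_number number n_iters (solve_number number n_iters)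

-- ===== LEMMAS AND PROOFS =====

-- a foldl whose step ignores the list elements is an iterate
theorem foldl_ignore {α β : Type} (f : α → α) (l : List β) (init : α) :
    l.foldl (fun a _ => f a) init = f^[l.length] init := by
  induction l generalizing init with
  | nil => rfl
  | cons x xs ih => simpa [Function.iterate_succ_apply] using ih (f init)

def nums (number : Int) : Nat → Int
  | 0 => number
  | k + 1 => nextNumber (nums number k)

def price (number : Int) (j : Nat) : Int := PySem.Int.mod (nums number j) 10

def dif (number : Int) (j : Nat) : Int := price number (j + 1) - price number j

def tryAdd (number : Int) (sp : List (Int × Int × Int × Int × Int)) (j : Nat) :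
    List (Int × Int × Int × Int × Int) :=
  let s := (dif number j, dif number (j + 1), dif number (j + 2), dif number (j + 3))
  if hasKeyA sp s then sp else sp ++ [(s.1, s.2.1, s.2.2.1, s.2.2.2, price number (j + 4))]

def dictTo (number : Int) : Nat → List (Int × Int × Int × Int × Int)
  | 0 => []
  | m + 1 => tryAdd number (dictTo number m) m

-- the deque contents after k iterations of A's loop
def W (number : Int) : Nat → List Int
  | 0 => []
  | 1 => [dif number 0]
  | 2 => [dif number 0, dif number 1]
  | 3 => [dif number 0, dif number 1, dif number 2]
  | (k + 4) => [dif number k, dif number (k + 1), dif number (k + 2), dif number (k + 3)]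

theorem stepA_iter (number : Int) (k : Nat) :
    stepA^[k] (number, PySem.Int.mod number 10, ([] : List Int), ([] : List (Int × Int × Int × Int × Int)))
      = (nums number k, price number k, W number k, dictTo number (k - 3)) := by
  induction k with
  | zero => simp [nums, price, W, dictTo]
  | succ k ih =>
    rw [Function.iterate_succ_apply', ih]
    rcases k with _ | _ | _ | _ | k <;>
      simp [stepA, W, dictTo, tryAdd, dif, nums, price]

theorem A_char (number : Int) (n_iters : Int) :
    solve_number number n_iters = dictTo number (n_iters.toNat - 3) := by
  unfold solve_number
  rw [foldl_ignore stepA, stepA_iter, PySem.List.length_pyRange_one]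
  norm_num

theorem stepB1_iter (number : Int) (k : Nat) :
    stepB1^[k] (number, [PySem.Int.mod number 10])
      = (nums number k, (List.range (k + 1)).map (price number)) := by
  induction k with
  | zero => simp [nums, price]
  | succ k ih =>
    rw [Function.iterate_succ_apply', ih]
    simp [stepB1, nums, price, List.range_succ]

theorem fold2 (number : Int) (k m : Nat) (hm : m + 3 ≤ k) :
    (PySem.List.pyRange 0 (m : Int) 1).foldl
        (stepB2 ((List.range (k + 1)).map (price number))) [] = dictTo number m := by
  induction m with
  | zero => simp [PySem.List.pyRange_one_eq_nil le_rfl, dictTo]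
  | succ m ih =>
    have h1 : ((m + 1 : Nat) : Int) = (m : Int) + 1 := by push_cast; ring
    rw [h1, PySem.List.pyRange_one_succ_right (by positivity), List.foldl_append,
      ih (by omega)]
    show stepB2 _ _ _ = _
    have e : ∀ c : Nat, ((m : Int) + (c : Int)) = ((m + c : Nat) : Int) := by
      intro c; push_cast; ring
    have g : ∀ c : Nat, c ≤ 4 → m + c < k + 1 := by omega
    simp only [stepB2, show ((m:Int)+1) = ((m+1:Nat):Int) from e 1,
      show ((m:Int)+2) = ((m+2:Nat):Int) from e 2, show ((m:Int)+3) = ((m+3:Nat):Int) from e 3,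
      show ((m:Int)+4) = ((m+4:Nat):Int) from e 4, PySem.List.pyGetD_natCast,
      PySem.List.getD_map_range _ _ _ _ (g 1 (by norm_num)),
      PySem.List.getD_map_range _ _ _ _ (g 2 (by norm_num)),
      PySem.List.getD_map_range _ _ _ _ (g 3 (by norm_num)),
      PySem.List.getD_map_range _ _ _ _ (g 4 (by norm_num))]
    rw [show ((List.range (k+1)).map (price number)).getD m 0 = price number m from
      PySem.List.getD_map_range _ _ _ _ (by omega)]
    simp [dictTo, tryAdd, hasKeyB, hasKeyA, dif]

theorem B_char (number : Int) (n_iters : Int) :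
    solve_number_alt number n_iters = dictTo number (n_iters.toNat - 3) := by
  unfold solve_number_alt
  rw [foldl_ignore stepB1, PySem.List.length_pyRange_one, Int.sub_zero, stepB1_iter]
  simp only [List.length_map, List.length_range]
  by_cases h : 3 ≤ n_iters.toNat
  · rw [show ((n_iters.toNat + 1 : Nat) : Int) - 4 = ((n_iters.toNat - 3 : Nat) : Int) by
      push_cast [h]; omega]
    exact fold2 number n_iters.toNat (n_iters.toNat - 3) (by omega)
  · rw [PySem.List.pyRange_one_eq_nil (by push_cast; omega)]
    have : n_iters.toNat - 3 = 0 := by omega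
    rw [this]; rfl

-- ===== VERDICT (by name: the statement is the Claim_ definition above) =====
theorem solve_number_spec : Claim_equal_solve_number := by
  intro number n_iters _
  unfold Spec_solve_number
  rw [A_char, B_char]
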